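-- pv_equiv track=rewrite | github.com/YuZhang-Chen/zerojudge | c132.py | f
-- ===== SOURCE A (Python) =====
-- def f(k):
--     k=k[::-1]
--     sum=0
--     for i in range(len(k)):
--         sum+=(ord(k[i])-96)*(26**i)
--     sum=str(sum)[::-1]
--     ou=''
--     for i in range(len(sum)-1,-1,-1):
--         if i%3==2 and i!=len(sum)-1:
--             ou+=','
--         ou+=sum[i]
--     return ou
-- ===== SOURCE B (Python) =====
-- def f(k):
--     acc = 0
--     for c in k:
--         acc = acc * 26 + (ord(c) - 96)
--     s = str(acc)
--     chunks = []
--     while len(s) > 3: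
--         chunks.append(s[-3:])
--         s = s[:-3]
--     chunks.append(s)
--     return ','.join(reversed(chunks))
-- ===== Notes on version B (the rewrite author's own statement) =====
-- stated objective: faster
-- what changed: B replaces A's reverse-the-string-then-sum-(ord(c)-96)*26**i decoding (which recomputes the big-integer power 26**i on every iteration) by a left-to-right Horner accumulation, and replaces A's descending index loop with a parity test over the twice-reversed decimal string by peeling 3-character chunks off the right of str(acc) and joining them with commas.
import Mathlib
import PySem

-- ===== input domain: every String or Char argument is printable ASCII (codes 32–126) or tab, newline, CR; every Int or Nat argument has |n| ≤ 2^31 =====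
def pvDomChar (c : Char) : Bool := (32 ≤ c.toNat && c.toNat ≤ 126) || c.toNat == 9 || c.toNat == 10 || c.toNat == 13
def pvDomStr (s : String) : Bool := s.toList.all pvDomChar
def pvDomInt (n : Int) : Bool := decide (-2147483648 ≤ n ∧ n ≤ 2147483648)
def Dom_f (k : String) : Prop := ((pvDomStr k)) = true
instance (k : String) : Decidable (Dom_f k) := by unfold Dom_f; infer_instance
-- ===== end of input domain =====

-- B replaces A's reversed-string positional-power decoding by Horner's rule and A's
-- index-parity comma loop by right-chunking the decimal string; objective: simpler.

-- ===== PORT A =====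
def f (k : String) : String :=
  let kl := (PySem.List.slice? k.toList none none (-1)).getD []            -- k = k[::-1]
  let sum := (PySem.List.pyRange 0 (kl.length : Int) 1).foldl              -- for i in range(len(k))
    (fun acc i => acc + (((PySem.List.pyGetD kl i ' ').toNat : Int) - 96) * 26 ^ i.toNat) 0
  let s := (PySem.List.slice? (PySem.Int.toChars sum) none none (-1)).getD []  -- sum = str(sum)[::-1]
  let ou := (PySem.List.pyRange ((s.length : Int) - 1) (-1) (-1)).foldl    -- for i in range(len(sum)-1,-1,-1)
    (fun ou i =>
      (if PySem.Int.mod i 3 = 2 ∧ i ≠ (s.length : Int) - 1 then ou ++ [','] else ou)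
        ++ [PySem.List.pyGetD s i ' ']) []
  String.ofList ou

-- ===== PORT B =====
-- fuel: s.length passes always suffice, each pass shortens s by 3 (totality device only)
def chunks3 : Nat → List Char → List (List Char)
  | 0, s => [s]
  | fuel+1, s =>
    if 3 < s.length then
      PySem.List.slice s (some (-3)) none :: chunks3 fuel (PySem.List.slice s none (some (-3)))
    else [s]

def f_alt (k : String) : String :=
  let acc := k.toList.foldl (fun a c => a * 26 + ((c.toNat : Int) - 96)) 0
  let s := PySem.Int.toChars acc
  String.ofList (List.intercalate [','] (chunks3 s.length s).reverse)

-- ===== PRECONDITION & SPEC =====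
def Spec_f (k : String) (out : String) : Prop := out = f_alt k
instance (k : String) (out : String) : Decidable (Spec_f k out) := by unfold Spec_f; infer_instance

-- ===== CLAIM (what is proved, stated in full; the proofs are below) =====
def Claim_equal_f : Prop := ∀ (k : String), Dom_f k → Spec_f k (f k)

-- ===== LEMMAS AND PROOFS =====

-- value of one letter, as both programs compute it
def vc (c : Char) : Int := (c.toNat : Int) - 96

-- A's positional sum over a (reversed) character list
def SA (l : List Char) : Int := ((List.range l.length).map (fun i => vc (l.getD i ' ') * 26 ^ i)).sum

-- common comma format: character j of d, preceded by ',' when (n-1-j) % 3 = 2 and j ≠ 0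
def specFmt (n : Nat) (d : List Char) : List Char :=
  (List.range n).flatMap (fun j => (if (n-1-j) % 3 = 2 ∧ j ≠ 0 then [','] else []) ++ [d.getD j ' '])

lemma SA_append_singleton (xs : List Char) (c : Char) :
    SA (xs ++ [c]) = SA xs + vc c * 26 ^ xs.length := by
  unfold SA
  rw [show (xs ++ [c]).length = xs.length + 1 by simp, List.range_succ]
  rw [List.map_append, List.sum_append]
  congr 2
  · apply List.map_congr_left; intro i hi
    rw [List.getD_append _ _ _ _ (List.mem_range.mp hi)]
  · simp [List.getD]

lemma sumA_eq (kl : List Char) :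
    (PySem.List.pyRange 0 (kl.length : Int) 1).foldl
      (fun acc i => acc + (((PySem.List.pyGetD kl i ' ').toNat : Int) - 96) * 26 ^ i.toNat) 0
    = SA kl := by
  rw [PySem.List.pyRange_zero_nat kl.length, List.foldl_map]
  simp only [PySem.List.pyGetD_natCast, Int.toNat_natCast]
  rw [PySem.List.foldl_add (g := fun k => (((kl.getD k ' ').toNat : Int) - 96) * 26 ^ k)]
  simp [SA, vc]

lemma horner_eq (l : List Char) (a : Int) :
    l.foldl (fun x c => x * 26 + ((c.toNat : Int) - 96)) a
    = a * 26 ^ l.length + SA l.reverse := by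
  induction l generalizing a with
  | nil => simp [SA]
  | cons c r ih =>
    simp only [List.foldl_cons, List.reverse_cons, List.length_cons]
    rw [ih, SA_append_singleton]
    simp only [List.length_reverse]
    unfold vc; ring

lemma fmtA_eq (s : List Char) :
    (PySem.List.pyRange ((s.length : Int) - 1) (-1) (-1)).foldl
      (fun ou i =>
        (if PySem.Int.mod i 3 = 2 ∧ i ≠ (s.length : Int) - 1 then ou ++ [','] else ou)
          ++ [PySem.List.pyGetD s i ' ']) []
    = specFmt s.length s.reverse := by
  rw [PySem.List.pyRange_neg_one]
  rw [show (((s.length : Int) - 1) - (-1)).toNat = s.length by omega]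
  rw [List.foldl_map]
  rw [PySem.List.foldl_congr_mem _ _
      (fun ou k => ou ++ ((if (s.length - 1 - k) % 3 = 2 ∧ k ≠ 0 then [','] else [])
        ++ [s.reverse.getD k ' '])) _ ?_]
  · rw [PySem.List.foldl_append_eq_flatMap]
    rfl
  · intro ou k hk
    have hk' : k < s.length := List.mem_range.mp hk
    have h1 : PySem.List.pyGetD s ((s.length : Int) - 1 - ↑k) ' ' = s.reverse.getD k ' ' := by
      rw [show (s.length : Int) - 1 - ↑k = ((s.length - 1 - k : Nat) : Int) by omega]
      rw [PySem.List.pyGetD_natCast]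
      rw [List.getD_eq_getElem _ _ (by omega), List.getD_eq_getElem _ _ (by simp; omega)]
      rw [List.getElem_reverse]
    have h2 : (PySem.Int.mod ((s.length : Int) - 1 - ↑k) 3 = 2 ∧
        (s.length : Int) - 1 - ↑k ≠ (s.length : Int) - 1)
        ↔ ((s.length - 1 - k) % 3 = 2 ∧ k ≠ 0) := by
      rw [PySem.Int.mod_eq_emod_of_pos (by norm_num)]
      constructor
      · rintro ⟨ha, hb⟩; exact ⟨by omega, by omega⟩
      · rintro ⟨ha, hb⟩; exact ⟨by omega, by omega⟩
    rw [h1, if_congr h2 rfl rfl]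
    split_ifs with h <;> simp [h]

lemma map_getD_range (d : List Char) :
    (List.range d.length).map (fun j => d.getD j ' ') = d := by
  apply List.ext_getElem
  · simp
  · intro i h1 h2; simp [List.getD_eq_getElem?_getD, List.getElem?_eq_getElem h2]

lemma flatten_map_singleton {α : Type} (l : List α) (g : α → Char) :
    (l.map (fun j => [g j])).flatten = l.map g := by
  induction l with
  | nil => rfl
  | cons x t ih => simp [ih]

lemma specFmt_small (d : List Char) (h : d.length ≤ 3) : specFmt d.length d = d := by
  unfold specFmt
  rw [List.flatMap_def]
  rw [List.map_congr_left (f := fun j => (if (d.length-1-j) % 3 = 2 ∧ j ≠ 0 then [','] else []) ++ [d.getD j ' '])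
      (g := fun j => [d.getD j ' ']) ?_]
  · rw [flatten_map_singleton, map_getD_range]
  · intro j hj
    have hj' : j < d.length := List.mem_range.mp hj
    dsimp only
    rw [if_neg (by omega)]
    simp

lemma drop3 (d : List Char) (m : Nat) (hm : d.length = m + 3) :
    d.drop m = [d.getD m ' ', d.getD (m+1) ' ', d.getD (m+2) ' '] := by
  apply List.ext_getElem
  · simp [hm]
  · intro i h1 h2
    simp only [List.length_drop, hm] at h1
    have h3 : i < 3 := by omega
    rw [List.getElem_drop]
    interval_cases i <;>
      simp <;> rw [List.getElem?_eq_getElem (by omega)] <;> rfl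

lemma specFmt_step (d : List Char) (h : 3 < d.length) :
    specFmt d.length d
    = specFmt (d.length - 3) (d.take (d.length - 3)) ++ ',' :: d.drop (d.length - 3) := by
  obtain ⟨m, hm⟩ : ∃ m, d.length = m + 3 := ⟨d.length - 3, by omega⟩
  have hm1 : 1 ≤ m := by omega
  rw [show d.length - 3 = m from by omega]
  unfold specFmt
  rw [hm, List.range_add, List.flatMap_append, List.flatMap_def, List.flatMap_def,
      List.flatMap_def]
  congr 1
  · congr 1
    apply List.map_congr_left
    intro j hj
    have hj' : j < m := List.mem_range.mp hj
    rw [if_congr (show ((m+3-1-j) % 3 = 2 ∧ j ≠ 0) ↔ ((m-1-j) % 3 = 2 ∧ j ≠ 0) by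
          constructor <;> (rintro ⟨h1, h2⟩; exact ⟨by omega, h2⟩)) rfl rfl]
    congr 2
    rw [List.getD_eq_getElem?_getD, List.getD_eq_getElem?_getD,
        List.getElem?_take_of_lt hj']
  · rw [show List.range 3 = [0,1,2] from rfl]
    simp only [List.map_cons, List.map_nil, List.flatten]
    rw [drop3 d m hm]
    have c0 : (m+3-1-(m+0)) % 3 = 2 ∧ (m+0) ≠ 0 := by omega
    have c1 : ¬((m+3-1-(m+1)) % 3 = 2 ∧ (m+1) ≠ 0) := by omega
    have c2 : ¬((m+3-1-(m+2)) % 3 = 2 ∧ (m+2) ≠ 0) := by omega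
    rw [if_pos c0, if_neg c1, if_neg c2]
    simp

lemma icc (a b : List Char) (l : List (List Char)) :
    List.intercalate [','] (a :: b :: l) = a ++ [','] ++ List.intercalate [','] (b :: l) := by
  simp [List.intercalate, List.intersperse]

lemma inter_app (xs : List (List Char)) (t : List Char) (hx : xs ≠ []) :
    List.intercalate [','] (xs ++ [t]) = List.intercalate [','] xs ++ ',' :: t := by
  induction xs with
  | nil => simp at hx
  | cons a l ih =>
    cases l with
    | nil => simp [List.intercalate, List.intersperse]
    | cons b l2 =>
      rw [List.cons_append, List.cons_append, icc a b (l2 ++ [t]),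
          icc a b l2, ← List.cons_append, ih (by simp)]
      simp

lemma chunks3_ne_nil (fuel : Nat) (d : List Char) : chunks3 fuel d ≠ [] := by
  cases fuel with
  | zero => simp [chunks3]
  | succ n =>
    simp only [chunks3]
    split_ifs <;> simp

lemma chunks_spec (fuel : Nat) (d : List Char) (h : d.length ≤ fuel + 3) :
    specFmt d.length d = List.intercalate [','] (chunks3 fuel d).reverse := by
  induction fuel generalizing d with
  | zero =>
    rw [specFmt_small d (by omega)]
    simp [chunks3, List.intercalate]
  | succ n ih =>
    by_cases h3 : 3 < d.length
    · simp only [chunks3, if_pos h3]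
      rw [PySem.List.slice_from_neg_ofNat d 3 (by norm_num),
          PySem.List.slice_to_neg_ofNat d 3 (by norm_num)]
      rw [List.reverse_cons]
      rw [inter_app _ _ (by
        simpa using chunks3_ne_nil n (d.take (d.length - 3)))]
      rw [specFmt_step d h3]
      have hlen : (d.take (d.length - 3)).length = d.length - 3 := by
        simp
      have := ih (d.take (d.length - 3)) (by omega)
      rw [hlen] at this
      rw [this]
    · have hle : d.length ≤ 3 := by omega
      simp only [chunks3, if_neg h3]
      rw [specFmt_small d hle]
      simp [List.intercalate]

-- ===== VERDICT (by name: the statement is the Claim_ definition above) =====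
theorem f_spec : Claim_equal_f := by
  intro k _
  unfold Spec_f f f_alt
  simp only [PySem.List.slice?_none_none_neg_one, Option.getD_some]
  rw [sumA_eq, horner_eq]
  simp only [zero_mul, zero_add]
  rw [fmtA_eq]
  simp only [List.length_reverse, List.reverse_reverse]
  rw [chunks_spec (PySem.Int.toChars (SA k.toList.reverse)).length _ (by omega)]
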